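-- pv_equiv track=rewrite | github.com/worldEngineDev/DexUMI | dexumi/common/utility/parallel.py | assign_task_bounds_to_process
-- ===== SOURCE A (Python) =====
-- def assign_task_bounds_to_process(n_tasks, n_processes):
--     """
--     Assigns task ID bounds to GPUs as evenly as possible.
--
--     Parameters:
--     n_tasks (int): Number of tasks to be distributed.
--     n_gpus (int): Number of GPUs available.
--
--     Returns:
--     list: A list of tuples where each tuple represents the lower (inclusive)
--           and upper (exclusive) bounds of task IDs for that GPU.
--     """
--     # Calculate the base number of tasks per GPU and the remainder
--     tasks_per_processes = n_tasks // n_processes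
--     remainder = n_tasks % n_processes
--
--     # Initialize the starting task ID
--     start_id = 0
--
--     # Distribute tasks to GPUs
--     task_bounds = []
--     for i in range(n_processes):
--         # Determine the number of tasks for this process
--         num_tasks = tasks_per_processes + (1 if i < remainder else 0)
--         # Assign the bounds
--         task_bounds.append((start_id, start_id + num_tasks))
--         # Update the starting ID for the next GPU
--         start_id += num_tasks
--
--     return task_bounds
-- ===== SOURCE B (Python) =====
-- def assign_task_bounds_to_process(n_tasks, n_processes):
--     base = n_tasks // n_processes
--     remainder = n_tasks % n_processes
--     bound = lambda i: i * base + min(i, remainder)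
--     return [(bound(i), bound(i + 1)) for i in range(n_processes)]
-- ===== Notes on version B (the rewrite author's own statement) =====
-- stated objective: simpler
-- what changed: Replaced the running start_id accumulator loop with a closed-form cumulative boundary b(i)=i*base+min(i,remainder) evaluated independently per index in a comprehension.
import Mathlib
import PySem

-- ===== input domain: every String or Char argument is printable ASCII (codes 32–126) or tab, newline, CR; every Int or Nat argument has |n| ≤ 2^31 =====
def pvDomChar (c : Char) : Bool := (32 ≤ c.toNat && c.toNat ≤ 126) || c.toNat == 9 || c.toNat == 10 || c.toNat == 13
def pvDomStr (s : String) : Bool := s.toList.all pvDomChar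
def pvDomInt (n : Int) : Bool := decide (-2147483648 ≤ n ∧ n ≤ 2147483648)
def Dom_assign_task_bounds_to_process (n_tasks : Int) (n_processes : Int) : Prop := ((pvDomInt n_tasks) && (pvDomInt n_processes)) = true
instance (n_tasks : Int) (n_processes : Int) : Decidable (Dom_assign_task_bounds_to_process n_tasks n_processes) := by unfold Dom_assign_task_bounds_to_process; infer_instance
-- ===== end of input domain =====

-- B replaces A's running start_id accumulator with the closed-form cumulative boundary
-- b(i) = i*base + min(i, remainder), evaluated independently per index (objective: simpler).


-- ===== PORT A =====
def assign_task_bounds_to_process (n_tasks : Int) (n_processes : Int) : List (Int × Int) :=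
  let tasks_per_processes := PySem.Int.floordiv n_tasks n_processes
  let remainder := PySem.Int.mod n_tasks n_processes
  let st := (PySem.List.pyRange 0 n_processes 1).foldl
    (fun (st : Int × List (Int × Int)) i =>
      let num_tasks := tasks_per_processes + (if i < remainder then 1 else 0)
      (st.1 + num_tasks, st.2 ++ [(st.1, st.1 + num_tasks)]))
    (0, [])
  st.2

-- ===== PORT B =====
def assign_task_bounds_to_process_alt (n_tasks : Int) (n_processes : Int) : List (Int × Int) :=
  let base := PySem.Int.floordiv n_tasks n_processes
  let remainder := PySem.Int.mod n_tasks n_processes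
  let bound := fun (i : Int) => i * base + min i remainder
  (PySem.List.pyRange 0 n_processes 1).map (fun i => (bound i, bound (i + 1)))

-- ===== PRECONDITION & SPEC =====
-- A raises ZeroDivisionError when n_processes == 0 (the '//' before the loop); excluded.
def Pre_assign_task_bounds_to_process (n_tasks : Int) (n_processes : Int) : Prop := n_processes ≠ 0
instance (n_tasks : Int) (n_processes : Int) : Decidable (Pre_assign_task_bounds_to_process n_tasks n_processes) := by unfold Pre_assign_task_bounds_to_process; infer_instance
def pvWitness_assign_task_bounds_to_process : Int × Int := (7, 3)

def Spec_assign_task_bounds_to_process (n_tasks : Int) (n_processes : Int) (out : List (Int × Int)) : Prop := out = assign_task_bounds_to_process_alt n_tasks n_processes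
instance (n_tasks : Int) (n_processes : Int) (out : List (Int × Int)) : Decidable (Spec_assign_task_bounds_to_process n_tasks n_processes out) := by unfold Spec_assign_task_bounds_to_process; infer_instance

-- ===== CLAIM (what is proved, stated in full; the proofs are below) =====
def Claim_equal_assign_task_bounds_to_process : Prop := ∀ (n_tasks : Int) (n_processes : Int), Dom_assign_task_bounds_to_process n_tasks n_processes → Pre_assign_task_bounds_to_process n_tasks n_processes → Spec_assign_task_bounds_to_process n_tasks n_processes (assign_task_bounds_to_process n_tasks n_processes)

-- ===== LEMMAS AND PROOFS =====

-- the fold over range(0, m) with the running start_id equals the closed-form map,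
-- with the accumulator's start_id equal to the boundary formula at m
theorem fold_eq_map (base rem : Int) (hrem : 0 ≤ rem) (m : Nat) :
    (PySem.List.pyRange 0 (m : Int) 1).foldl
      (fun (st : Int × List (Int × Int)) i =>
        let num := base + (if i < rem then 1 else 0)
        (st.1 + num, st.2 ++ [(st.1, st.1 + num)]))
      (0, [])
    = ((m : Int) * base + min (m : Int) rem,
       (PySem.List.pyRange 0 (m : Int) 1).map
         (fun i => (i * base + min i rem, (i + 1) * base + min (i + 1) rem))) := by
  induction m with
  | zero => simp [PySem.List.pyRange_one_eq_nil]; omega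
  | succ k ih =>
      have hk : (0 : Int) ≤ (k : Int) := by positivity
      have hsplit := PySem.List.pyRange_one_succ_right (a := 0) (b := (k : Int)) hk
      push_cast
      push_cast at ih
      rw [hsplit, List.foldl_append, ih, List.map_append]
      simp only [List.foldl_cons, List.foldl_nil, List.map_cons, List.map_nil]
      have hm : min ((k:Int)+1) rem = min (k:Int) rem + (if (k:Int) < rem then 1 else 0) := by
        rw [min_def, min_def]; split_ifs <;> omega
      have h1 : (k:Int)*base + min (k:Int) rem + (base + (if (k:Int) < rem then 1 else 0))
          = ((k:Int)+1)*base + min ((k:Int)+1) rem := by rw [hm]; ring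
      rw [h1]

-- ===== VERDICT (by name: the statement is the Claim_ definition above) =====
theorem assign_task_bounds_to_process_spec : Claim_equal_assign_task_bounds_to_process := by
  intro n_tasks n_processes _ _
  unfold Spec_assign_task_bounds_to_process assign_task_bounds_to_process assign_task_bounds_to_process_alt
  by_cases h : 0 < n_processes
  · have h0 : 0 ≤ n_processes := le_of_lt h
    have hrem : 0 ≤ PySem.Int.mod n_tasks n_processes := PySem.Int.mod_nonneg _ h
    obtain ⟨m, rfl⟩ := Int.eq_ofNat_of_zero_le h0
    simp only [fold_eq_map _ _ hrem]
  · rw [PySem.List.pyRange_one_eq_nil (by omega)]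
    simp
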